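-- pv_equiv track=rewrite | github.com/lllilllilllilili/apache-beam | kaggle-data-preprocessing/src/train.py | process
-- ===== SOURCE A (Python) =====
-- def process(fields):
--     fields = fields.split(",")
--     #json_data = json.loads(fields)
--     header = "label"
--     for i in range(0, 784):
--         header += (",pixel" + str(i))
--
--     label_list_str = "["
--     label_list = []
--     for i in range(0,10) :
--         if fields[0] == str(i) :
--             #label_list.append(i)
--             label_list_str+=str(i)
--         else :
--             #label_list.append(0)
--             label_list_str+=("0")
--         if i!=9 :
--             label_list_str+=","
--     label_list_str+="],"
--     for i in range(1,len(fields)) :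
--         label_list_str+=fields[i]
--         if i!=len(fields)-1:
--             label_list_str+=","
--
--     yield label_list_str
-- ===== SOURCE B (Python) =====
-- def process(fields):
--     head, _, tail = fields.partition(",")
--     prefix = "[0,0,0,0,0,0,0,0,0,0],"
--     if len(head) == 1 and "0" <= head <= "9":
--         i = 1 + 2 * (ord(head) - 48)
--         prefix = prefix[:i] + head + prefix[i + 1:]
--     yield prefix + tail
-- ===== Notes on version B (the rewrite author's own statement) =====
-- stated objective: simpler
-- what changed: B never splits the input into a field list, never loops over the ten digits and never builds the unused 785-name header: it partitions at the first comma, patches a constant 22-character all-zeros template at arithmetic index 1+2*digit when the label is a single ASCII digit, and appends the raw remainder of the string unchanged.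
import Mathlib
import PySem

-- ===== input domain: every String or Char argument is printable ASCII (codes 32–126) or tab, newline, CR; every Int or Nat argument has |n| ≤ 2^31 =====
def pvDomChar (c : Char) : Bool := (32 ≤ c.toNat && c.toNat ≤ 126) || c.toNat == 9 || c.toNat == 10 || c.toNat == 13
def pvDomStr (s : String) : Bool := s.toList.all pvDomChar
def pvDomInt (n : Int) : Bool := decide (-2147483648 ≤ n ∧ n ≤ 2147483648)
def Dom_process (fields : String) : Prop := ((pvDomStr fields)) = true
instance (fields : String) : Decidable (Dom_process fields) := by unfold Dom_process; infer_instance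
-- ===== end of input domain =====

-- B partitions at the first comma and patches a constant all-zeros template at an arithmetic
-- index instead of splitting into a field list, scanning ten digits and rejoining (objective:
-- simpler; it also skips the discarded header A builds).
-- Strings under construction are represented as List Char (PySem.Chars), exact on the domain.

-- ===== PORT A =====
def process (fields : String) : List String :=
  let fs := PySem.Chars.splitOn fields.toList [',']        -- fields = fields.split(",")
  -- header loop (computed and discarded by A, kept for faithfulness)
  let header := (PySem.List.pyRange 0 784).foldl
      (fun h i => h ++ (",pixel".toList ++ PySem.Int.toChars i)) "label".toList
  let f0 := fs.headD []                                    -- fields[0]; split always returns ≥ 1 piece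
  let s1 := (PySem.List.pyRange 0 10).foldl (fun s i =>
      let s := s ++ (if f0 = PySem.Int.toChars i then PySem.Int.toChars i else ['0'])
      if i ≠ 9 then s ++ [','] else s) ['[']
  let s2 := s1 ++ "],".toList
  let n : Int := fs.length
  let s3 := (PySem.List.pyRange 1 n).foldl (fun s i =>
      let s := s ++ PySem.List.pyGetD fs i []
      if i ≠ n - 1 then s ++ [','] else s) s2
  let _ := header
  [String.ofList s3]

-- ===== PORT B =====
def process_alt (fields : String) : List String :=
  let cs := fields.toList
  let head := cs.takeWhile (fun c => c ≠ ',')              -- head, _, tail = fields.partition(",")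
  let tail := (cs.dropWhile (fun c => c ≠ ',')).drop 1     -- tail = after the first ',' ([] if none)
  let template := "[0,0,0,0,0,0,0,0,0,0],".toList
  let pre :=
    -- len(head) == 1 and "0" <= head <= "9": on a 1-char string this is the code-point range check
    if head.length = 1 ∧ 48 ≤ (head.headD ' ').toNat ∧ (head.headD ' ').toNat ≤ 57 then
      let i := 1 + 2 * ((head.headD ' ').toNat - 48)       -- i = 1 + 2*(ord(head)-48)
      template.take i ++ head ++ template.drop (i + 1)     -- prefix[:i] + head + prefix[i+1:]; 1 ≤ i ≤ 19, so take/drop = Python slices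
    else template
  [String.ofList (pre ++ tail)]

-- ===== PRECONDITION & SPEC =====
def Spec_process (fields : String) (out : List String) : Prop := out = process_alt fields
instance (fields : String) (out : List String) : Decidable (Spec_process fields out) := by unfold Spec_process; infer_instance

-- ===== CLAIM (what is proved, stated in full; the proofs are below) =====
def Claim_equal_process : Prop := ∀ (fields : String), Dom_process fields → Spec_process fields (process fields)

-- ===== LEMMAS AND PROOFS =====

-- reference single-separator split, structural on the string
def sp (pre : List Char) : List Char → List (List Char)
  | [] => [pre]
  | c :: rest => if c = ',' then pre :: sp [] rest else sp (pre ++ [c]) rest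

lemma sp_ne_nil (pre cs : List Char) : sp pre cs ≠ [] := by
  induction cs generalizing pre with
  | nil => simp [sp]
  | cons c rest ih => by_cases h : c = ',' <;> simp [sp, h, ih]

lemma splitOn_go_eq (fuel : Nat) : ∀ (cs cur : List Char) (acc : List (List Char)),
    cs.length < fuel →
    PySem.Chars.splitOn.go [','] fuel cs cur acc = acc.reverse ++ sp cur.reverse cs := by
  induction fuel with
  | zero => intro cs cur acc h; omega
  | succ f ih =>
    intro cs cur acc h
    cases cs with
    | nil => simp [PySem.Chars.splitOn.go, sp]
    | cons c rest =>
      by_cases hc : c = ','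
      · subst hc
        rw [show PySem.Chars.splitOn.go [','] (f+1) (',' :: rest) cur acc
              = PySem.Chars.splitOn.go [','] f rest [] (cur.reverse :: acc) from by
            simp [PySem.Chars.splitOn.go, List.isPrefixOf]]
        rw [ih rest [] (cur.reverse :: acc) (by simpa using Nat.lt_of_succ_lt_succ h)]
        simp [sp]
      · rw [show PySem.Chars.splitOn.go [','] (f+1) (c :: rest) cur acc
              = PySem.Chars.splitOn.go [','] f rest (c :: cur) acc from by
            simp [PySem.Chars.splitOn.go, List.isPrefixOf, Ne.symm hc]]
        rw [ih rest (c :: cur) acc (by simpa using Nat.lt_of_succ_lt_succ h)]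
        simp [sp, hc]

lemma splitOn_eq_sp (cs : List Char) : PySem.Chars.splitOn cs [','] = sp [] cs := by
  rw [PySem.Chars.splitOn, splitOn_go_eq (cs.length + 1) cs [] [] (Nat.lt_succ_self _)]
  simp

lemma sp_headD (cs : List Char) : ∀ pre, (sp pre cs).headD [] = pre ++ cs.takeWhile (fun c => c ≠ ',') := by
  induction cs with
  | nil => intro pre; simp [sp]
  | cons c rest ih =>
    intro pre
    by_cases hc : c = ','
    · subst hc; simp [sp]
    · simp only [sp, if_neg hc]
      rw [ih]
      simp [hc]

lemma sp_join (cs : List Char) : ∀ pre, PySem.Chars.join [','] (sp pre cs) = pre ++ cs := by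
  induction cs with
  | nil => intro pre; simp [sp, PySem.Chars.join_singleton]
  | cons c rest ih =>
    intro pre
    by_cases hc : c = ','
    · subst hc
      obtain ⟨y, ys, hys⟩ := List.exists_cons_of_ne_nil (sp_ne_nil [] rest)
      rw [show sp pre (',' :: rest) = pre :: sp [] rest from by simp [sp]]
      rw [hys, PySem.Chars.join_cons_cons, ← hys, ih]
      simp
    · simp [sp, hc, ih]

lemma sp_tail_join (cs : List Char) : ∀ pre,
    PySem.Chars.join [','] ((sp pre cs).tail) = (cs.dropWhile (fun c => c ≠ ',')).drop 1 := by
  induction cs with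
  | nil => intro pre; simp [sp, PySem.Chars.join_nil]
  | cons c rest ih =>
    intro pre
    by_cases hc : c = ','
    · subst hc; simp [sp, List.dropWhile, sp_join]
    · simp [sp, hc, List.dropWhile, ih]

lemma sp_headD0 (cs : List Char) : (sp [] cs).headD [] = cs.takeWhile (fun c => c ≠ ',') := by
  rw [sp_headD]; rfl

-- A's tail loop over indices 1..len-1 is the comma-join of the tail of the split.
lemma tail_fold (l : List (List Char)) : ∀ (k a : Nat) (s : List Char), l.length - a = k →
    (PySem.List.pyRange (a : Int) (l.length : Int)).foldl (fun s i =>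
        if i ≠ (l.length : Int) - 1 then s ++ PySem.List.pyGetD l i [] ++ [',']
        else s ++ PySem.List.pyGetD l i []) s
      = s ++ PySem.Chars.join [','] (l.drop a) := by
  intro k
  induction k with
  | zero =>
    intro a s ha
    have hge : l.length ≤ a := by omega
    have : PySem.List.pyRange (a : Int) (l.length : Int) = [] := by
      simp [PySem.List.pyRange]; omega
    simp [this, List.drop_eq_nil_of_le hge, PySem.Chars.join_nil]
  | succ k ih =>
    intro a s ha
    have hlt : a < l.length := by omega
    have hltI : (a : Int) < (l.length : Int) := by exact_mod_cast hlt
    rw [PySem.List.pyRange_one_cons hltI]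
    have hcast : ((a : Int) + 1) = ((a + 1 : Nat) : Int) := by push_cast; ring
    have hdrop : l.drop a = l[a] :: l.drop (a + 1) := List.drop_eq_getElem_cons hlt
    have hget : PySem.List.pyGetD l (a : Int) [] = l[a] := by
      rw [PySem.List.pyGetD_natCast]; exact List.getD_eq_getElem l [] hlt
    by_cases hlast : a = l.length - 1
    · have hempty : l.drop (a + 1) = [] := by
        apply List.drop_eq_nil_of_le; omega
      have hr : PySem.List.pyRange ((a : Int) + 1) (l.length : Int) = [] := by
        simp [PySem.List.pyRange]; omega
      simp only [List.foldl_cons, hr, List.foldl_nil]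
      rw [if_neg (by omega : ¬((a : Int) ≠ (l.length : Int) - 1))]
      rw [hget, hdrop, hempty, PySem.Chars.join_singleton]
    · have hne : (a : Int) ≠ (l.length : Int) - 1 := by omega
      simp only [List.foldl_cons]
      rw [if_pos hne, hget, hcast, ih (a + 1) _ (by omega)]
      have hne' : l.drop (a + 1) ≠ [] := by
        intro h
        have := List.drop_eq_nil_iff.mp h
        omega
      obtain ⟨y, ys, hys⟩ := List.exists_cons_of_ne_nil hne'
      rw [hdrop, hys, PySem.Chars.join_cons_cons, ← hys]
      simp

-- the tail loop as A writes it, starting at index 1: drop 1 = tail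
lemma tail_fold_one (l : List (List Char)) (s : List Char) :
    (PySem.List.pyRange 1 (l.length : Int)).foldl (fun s i =>
        if i ≠ (l.length : Int) - 1 then s ++ PySem.List.pyGetD l i [] ++ [',']
        else s ++ PySem.List.pyGetD l i []) s
      = s ++ PySem.Chars.join [','] l.tail := by
  have h := tail_fold l (l.length - 1) 1 s rfl
  simpa [List.drop_one] using h

lemma char_eq_of_toNat {c d : Char} (h : c.toNat = d.toNat) : c = d := by
  apply Char.ext
  exact UInt32.toNat_inj.mp h

-- A's ten-way comparison loop (plus "],") equals B's patched template.
lemma onehot_tpl (f0 : List Char) :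
    (PySem.List.pyRange 0 10).foldl (fun s i =>
        if i ≠ 9 then (s ++ (if f0 = PySem.Int.toChars i then PySem.Int.toChars i else ['0'])) ++ [',']
        else s ++ (if f0 = PySem.Int.toChars i then PySem.Int.toChars i else ['0'])) ['['] ++ "],".toList
      = (if f0.length = 1 ∧ 48 ≤ (f0.headD ' ').toNat ∧ (f0.headD ' ').toNat ≤ 57 then
           ("[0,0,0,0,0,0,0,0,0,0],".toList).take (1 + 2 * ((f0.headD ' ').toNat - 48))
             ++ f0 ++ ("[0,0,0,0,0,0,0,0,0,0],".toList).drop (1 + 2 * ((f0.headD ' ').toNat - 48) + 1)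
         else "[0,0,0,0,0,0,0,0,0,0],".toList) := by
  by_cases h0 : f0 = ['0']; · subst h0; decide
  by_cases h1 : f0 = ['1']; · subst h1; decide
  by_cases h2 : f0 = ['2']; · subst h2; decide
  by_cases h3 : f0 = ['3']; · subst h3; decide
  by_cases h4 : f0 = ['4']; · subst h4; decide
  by_cases h5 : f0 = ['5']; · subst h5; decide
  by_cases h6 : f0 = ['6']; · subst h6; decide
  by_cases h7 : f0 = ['7']; · subst h7; decide
  by_cases h8 : f0 = ['8']; · subst h8; decide
  by_cases h9 : f0 = ['9']; · subst h9; decide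
  have hguard : ¬ (f0.length = 1 ∧ 48 ≤ (f0.headD ' ').toNat ∧ (f0.headD ' ').toNat ≤ 57) := by
    rintro ⟨hlen, hlo, hhi⟩
    obtain ⟨c, hc⟩ := List.length_eq_one_iff.mp hlen
    subst hc
    simp only [List.headD_cons] at hlo hhi
    interval_cases h : c.toNat
    · exact h0 (by rw [char_eq_of_toNat (h.trans rfl : c.toNat = ('0').toNat)])
    · exact h1 (by rw [char_eq_of_toNat (h.trans rfl : c.toNat = ('1').toNat)])
    · exact h2 (by rw [char_eq_of_toNat (h.trans rfl : c.toNat = ('2').toNat)])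
    · exact h3 (by rw [char_eq_of_toNat (h.trans rfl : c.toNat = ('3').toNat)])
    · exact h4 (by rw [char_eq_of_toNat (h.trans rfl : c.toNat = ('4').toNat)])
    · exact h5 (by rw [char_eq_of_toNat (h.trans rfl : c.toNat = ('5').toNat)])
    · exact h6 (by rw [char_eq_of_toNat (h.trans rfl : c.toNat = ('6').toNat)])
    · exact h7 (by rw [char_eq_of_toNat (h.trans rfl : c.toNat = ('7').toNat)])
    · exact h8 (by rw [char_eq_of_toNat (h.trans rfl : c.toNat = ('8').toNat)])
    · exact h9 (by rw [char_eq_of_toNat (h.trans rfl : c.toNat = ('9').toNat)])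
  rw [if_neg hguard]
  have e0 : PySem.Int.toChars 0 = ['0'] := by decide
  have e1 : PySem.Int.toChars 1 = ['1'] := by decide
  have e2 : PySem.Int.toChars 2 = ['2'] := by decide
  have e3 : PySem.Int.toChars 3 = ['3'] := by decide
  have e4 : PySem.Int.toChars 4 = ['4'] := by decide
  have e5 : PySem.Int.toChars 5 = ['5'] := by decide
  have e6 : PySem.Int.toChars 6 = ['6'] := by decide
  have e7 : PySem.Int.toChars 7 = ['7'] := by decide
  have e8 : PySem.Int.toChars 8 = ['8'] := by decide
  have e9 : PySem.Int.toChars 9 = ['9'] := by decide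
  rw [show PySem.List.pyRange 0 10 = [0,1,2,3,4,5,6,7,8,9] from by decide]
  simp only [List.foldl, e0, e1, e2, e3, e4, e5, e6, e7, e8, e9]
  simp only [if_neg h0, if_neg h1, if_neg h2, if_neg h3, if_neg h4,
             if_neg h5, if_neg h6, if_neg h7, if_neg h8, if_neg h9]
  decide

-- ===== VERDICT (by name: the statement is the Claim_ definition above) =====
theorem process_spec : Claim_equal_process := by
  intro fields _
  unfold Spec_process process process_alt
  simp only []
  rw [tail_fold_one, splitOn_eq_sp, sp_headD0, sp_tail_join]
  rw [onehot_tpl]
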